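-- pv_equiv track=rewrite | github.com/pty9714/SSAFY_10_class11_algorithm | 20231128/python /pgr.py | solution
-- ===== SOURCE A (Python) =====
-- from collections import deque
-- from copy import deepcopy
-- from collections import deque, defaultdict
--
-- def solution(land):
--     answer = 0
--     n, m = len(land), len(land[0])
--     dx, dy = [-1, 1, 0, 0], [0, 0, -1, 1]
--     for j in range(m):
--         newLand = deepcopy(land)
--         visited = [[0] * m for _ in range(n)]
--         cnt = 0
--         for i in range(n):
--             if newLand[i][j] and not visited[i][j]:
--                 q = deque()
--                 q.append((i, j))
--                 newLand[i][j] = 0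
--                 visited[i][j] = 1
--                 cnt += 1
--                 while q:
--                     x, y = q.popleft()
--                     for d in range(4):
--                         nx, ny = x + dx[d], y + dy[d]
--                         if 0 <= nx < n and 0 <= ny < m:
--                             if visited[nx][ny]: continue
--                             if newLand[nx][ny]:
--                                 q.append((nx, ny))
--                                 newLand[nx][ny] = 0
--                                 visited[nx][ny] = 1
--                                 cnt += 1
--         answer = max(answer, cnt)
--     return answer
-- ===== SOURCE B (Python) =====
-- def solution(land):
--     n, m = len(land), len(land[0])
--     filled = {(i, j) for i in range(n) for j in range(m) if land[i][j]}
--     best = 0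
--     for j in range(m):
--         comp = {(i, j) for i in range(n) if (i, j) in filled}
--         while True:
--             grown = comp | {(x + a, y + b) for (x, y) in comp
--                             for a, b in ((1, 0), (-1, 0), (0, 1), (0, -1))
--                             if (x + a, y + b) in filled}
--             if grown == comp:
--                 break
--             comp = grown
--         best = max(best, len(comp))
--     return best
-- ===== Notes on version B (the rewrite author's own statement) =====
-- stated objective: simpler
-- what changed: A deep-copies the grid and runs a queue-based BFS with a visited matrix per column; B precomputes the set of filled cells once and, per column, grows the seed set to a fixpoint by repeated neighbour dilation, returning the max of the resulting set sizes.
import Mathlib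
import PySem

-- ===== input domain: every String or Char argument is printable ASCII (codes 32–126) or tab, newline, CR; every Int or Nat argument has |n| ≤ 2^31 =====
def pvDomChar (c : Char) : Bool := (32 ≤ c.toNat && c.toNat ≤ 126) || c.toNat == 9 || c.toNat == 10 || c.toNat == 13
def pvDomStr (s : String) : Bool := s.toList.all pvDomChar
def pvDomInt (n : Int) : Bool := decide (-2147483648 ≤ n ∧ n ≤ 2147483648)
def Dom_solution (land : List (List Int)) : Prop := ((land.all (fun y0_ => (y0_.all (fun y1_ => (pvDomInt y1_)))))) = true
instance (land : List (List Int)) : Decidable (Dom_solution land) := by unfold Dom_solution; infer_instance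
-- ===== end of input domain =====

-- B replaces A's per-column flood fill (deepcopy + visited matrix + BFS queue) by one precomputed
-- set of filled cells and a frontier-free grow-to-fixpoint dilation per column: simpler, not faster.
-- Equivalence is proved for the return value only (A mutates nothing observable).

-- ===== PORT A =====
-- land[i][j] read/write on the list-of-lists, Int indices (total forms; in range under Pre_)
def pvGet2 (g : List (List Int)) (i j : Int) : Int :=
  PySem.List.pyGetD (PySem.List.pyGetD g i []) j 0

def pvSet2 (g : List (List Int)) (i j : Int) (v : Int) : List (List Int) :=
  PySem.List.pySetD g i (PySem.List.pySetD (PySem.List.pyGetD g i []) j v)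

-- dx, dy = [-1, 1, 0, 0], [0, 0, -1, 1], zipped
def pvDirs : List (Int × Int) := [(-1, 0), (1, 0), (0, -1), (0, 1)]

-- one direction d of A's inner 'for d in range(4)': state = (newLand, visited, cnt, q)
def pvStepA (n m : Nat) (x y : Int)
    (st : List (List Int) × List (List Int) × Int × List (Int × Int)) (d : Int × Int) :
    List (List Int) × List (List Int) × Int × List (Int × Int) :=
  let nx := x + d.1
  let ny := y + d.2
  if 0 ≤ nx ∧ nx < (n : Int) ∧ 0 ≤ ny ∧ ny < (m : Int) then
    if pvGet2 st.2.1 nx ny ≠ 0 then st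
    else if pvGet2 st.1 nx ny ≠ 0 then
      (pvSet2 st.1 nx ny 0, pvSet2 st.2.1 nx ny 1, st.2.2.1 + 1, st.2.2.2 ++ [(nx, ny)])
    else st
  else st

-- A's 'while q:' loop (fuel only makes it total; n*m+1 always suffices, proved below)
def pvBFS (n m : Nat) :
    Nat → List (List Int) × List (List Int) × Int × List (Int × Int) →
    List (List Int) × List (List Int) × Int × List (Int × Int)
  | 0, st => st
  | fuel + 1, st =>
    match st.2.2.2 with
    | [] => st
    | (x, y) :: q' =>
      pvBFS n m fuel (pvDirs.foldl (pvStepA n m x y) (st.1, st.2.1, st.2.2.1, q'))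

-- body of A's 'for i in range(n)': state = (newLand, visited, cnt)
def pvRowA (n m : Nat) (j : Int) (st : List (List Int) × List (List Int) × Int) (i : Int) :
    List (List Int) × List (List Int) × Int :=
  if pvGet2 st.1 i j ≠ 0 ∧ ¬ pvGet2 st.2.1 i j ≠ 0 then
    let r := pvBFS n m (n * m + 1) (pvSet2 st.1 i j 0, pvSet2 st.2.1 i j 1, st.2.2 + 1, [(i, j)])
    (r.1, r.2.1, r.2.2.1)
  else st

def solution (land : List (List Int)) : Int :=
  let n := land.length
  let m := (PySem.List.pyGetD land 0 []).length
  (List.range m).foldl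
    (fun answer (j : Nat) =>
      let visited0 := List.replicate n (List.replicate m (0 : Int))
      let st := (List.range n).foldl
        (fun (st : List (List Int) × List (List Int) × Int) (i : Nat) =>
          pvRowA n m (j : Int) st (i : Int)) (land, visited0, (0 : Int))
      max answer st.2.2)
    0

-- ===== PORT B =====
def pvDirsB : List (Int × Int) := [(1, 0), (-1, 0), (0, 1), (0, -1)]

-- filled = {(i, j) for i in range(n) for j in range(m) if land[i][j]}
def pvFilled (land : List (List Int)) (n m : Nat) : PySem.Set (Int × Int) :=
  (List.range n).foldl
    (fun s i =>
      (List.range m).foldl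
        (fun s j =>
          if (land.getD i []).getD j 0 ≠ 0 then PySem.Set.add s ((i : Int), (j : Int)) else s)
        s)
    PySem.Set.empty

-- grown = comp | {neighbours of comp inside filled}
def pvGrow (filled : List (Int × Int)) (comp : PySem.Set (Int × Int)) : PySem.Set (Int × Int) :=
  comp.foldl
    (fun acc c =>
      pvDirsB.foldl
        (fun acc d =>
          if (c.1 + d.1, c.2 + d.2) ∈ filled then PySem.Set.add acc (c.1 + d.1, c.2 + d.2)
          else acc)
        acc)
    comp

-- B's 'while True: … if grown == comp: break' (fuel only makes it total; |filled|+1 suffices)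
def pvSaturate (filled : List (Int × Int)) :
    Nat → PySem.Set (Int × Int) → PySem.Set (Int × Int)
  | 0, comp => comp
  | fuel + 1, comp =>
    let grown := pvGrow filled comp
    if PySem.Set.equal grown comp then comp else pvSaturate filled fuel grown

def solution_alt (land : List (List Int)) : Int :=
  let n := land.length
  let m := (land.headD []).length
  let filled := pvFilled land n m
  (List.range m).foldl
    (fun best (j : Nat) =>
      let comp0 := (List.range n).foldl
        (fun (s : PySem.Set (Int × Int)) (i : Nat) =>
          if ((i : Int), (j : Int)) ∈ filled then PySem.Set.add s ((i : Int), (j : Int)) else s)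
        PySem.Set.empty
      let comp := pvSaturate filled (filled.length + 1) comp0
      max best (comp.length : Int))
    0

-- ===== PRECONDITION & SPEC =====
-- Pre_ excludes exactly the inputs where A raises: empty land (land[0] → IndexError) and rows
-- shorter than the first row (land[i][j] → IndexError); rows longer than the first are fine.
def Pre_solution (land : List (List Int)) : Prop :=
  land ≠ [] ∧ ∀ row ∈ land, (land.headD []).length ≤ row.length
instance (land : List (List Int)) : Decidable (Pre_solution land) := by
  unfold Pre_solution; infer_instance

def pvWitness_solution : List (List Int) := [[1, 0], [1, 1]]

def Spec_solution (land : List (List Int)) (out : Int) : Prop := out = solution_alt land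
instance (land : List (List Int)) (out : Int) : Decidable (Spec_solution land out) := by
  unfold Spec_solution; infer_instance

-- ===== CLAIM (what is proved, stated in full; the proofs are below) =====
def Claim_equal_solution : Prop :=
  ∀ (land : List (List Int)), Dom_solution land → Pre_solution land →
    Spec_solution land (solution land)

-- ===== LEMMAS AND PROOFS =====

-- ---- abstract grid / connectivity layer ----

-- "cell c is a filled in-grid cell of L"
def pvF (L : List (List Int)) (n m : Nat) (c : Int × Int) : Prop :=
  0 ≤ c.1 ∧ c.1 < (n : Int) ∧ 0 ≤ c.2 ∧ c.2 < (m : Int) ∧ pvGet2 L c.1 c.2 ≠ 0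

-- adjacency between filled cells (4-neighbourhood)
def pvAdj (L : List (List Int)) (n m : Nat) (c d : Int × Int) : Prop :=
  pvF L n m c ∧ pvF L n m d ∧ (d.1 - c.1, d.2 - c.2) ∈ pvDirs

def pvSeed (L : List (List Int)) (n m : Nat) (j : Int) (c : Int × Int) : Prop :=
  pvF L n m c ∧ c.2 = j

def pvReach (L : List (List Int)) (n m : Nat) (j : Int) (x : Int × Int) : Prop :=
  ∃ c, pvSeed L n m j c ∧ Relation.ReflTransGen (pvAdj L n m) c x

lemma pvReach_F {L : List (List Int)} {n m : Nat} {j : Int} {x : Int × Int}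
    (h : pvReach L n m j x) : pvF L n m x := by
  obtain ⟨c, hc, hr⟩ := h
  induction hr with
  | refl => exact hc.1
  | tail _ h2 _ => exact h2.2.1

-- any set that contains the seeds, is contained in the reachable set and is closed under
-- adjacency IS the reachable set
lemma pvMem_iff_reach {L : List (List Int)} {n m : Nat} {j : Int} (W : Int × Int → Prop)
    (hseed : ∀ c, pvSeed L n m j c → W c)
    (hsub : ∀ w, W w → pvReach L n m j w)
    (hcl : ∀ w, W w → ∀ d, pvAdj L n m w d → W d) :
    ∀ x, W x ↔ pvReach L n m j x := by
  intro x
  constructor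
  · exact hsub x
  · rintro ⟨c, hc, hr⟩
    induction hr with
    | refl => exact hseed c hc
    | tail _ h2 ih => exact hcl _ ih _ h2

-- ---- list-of-lists matrix lemmas ----

lemma pvPyGetD_nonneg {α : Type} (xs : List α) (i : Int) (d : α) (h : 0 ≤ i) :
    PySem.List.pyGetD xs i d = xs.getD i.toNat d := by
  rw [show i = ((i.toNat : Nat) : Int) from (Int.toNat_of_nonneg h).symm,
    PySem.List.pyGetD_natCast]
  rw [show ((i.toNat : Int)).toNat = i.toNat by omega]

lemma pvGet2_nonneg (g : List (List Int)) (i j : Int) (hi : 0 ≤ i) (hj : 0 ≤ j) :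
    pvGet2 g i j = (g.getD i.toNat []).getD j.toNat 0 := by
  unfold pvGet2
  rw [pvPyGetD_nonneg _ _ _ hi, pvPyGetD_nonneg _ _ _ hj]

lemma pvSet2_nonneg (g : List (List Int)) (i j : Int) (v : Int) (hi : 0 ≤ i) (hj : 0 ≤ j) :
    pvSet2 g i j v = g.set i.toNat ((g.getD i.toNat []).set j.toNat v) := by
  unfold pvSet2
  rw [PySem.List.pySetD_of_nonneg _ _ hi, pvPyGetD_nonneg _ _ _ hi,
    PySem.List.pySetD_of_nonneg _ _ hj]

lemma pvLength_set2 (g : List (List Int)) (i j : Int) (v : Int) (hi : 0 ≤ i) (hj : 0 ≤ j) :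
    (pvSet2 g i j v).length = g.length := by
  rw [pvSet2_nonneg _ _ _ _ hi hj]; simp

lemma pvRow_set2 (g : List (List Int)) (i j : Int) (v : Int) (hi : 0 ≤ i) (hj : 0 ≤ j)
    (k : Nat) :
    ((pvSet2 g i j v).getD k []).length = (g.getD k []).length := by
  rw [pvSet2_nonneg _ _ _ _ hi hj]
  by_cases hk : i.toNat = k
  · subst hk
    by_cases hlen : i.toNat < g.length
    · simp [List.getD, List.getElem?_set, hlen]
    · simp [List.getD, List.getElem?_set, hlen]
  · simp [List.getD, List.getElem?_set, hk]

lemma pvGetD_set1 (r : List Int) (b j : Nat) (v : Int) (hb : b < r.length) :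
    (r.set b v).getD j 0 = if j = b then v else r.getD j 0 := by
  by_cases hjb : b = j
  · subst hjb; simp [List.getD, List.getElem?_set, hb]
  · simp [List.getD, List.getElem?_set, hjb, Ne.symm hjb]

lemma pvGetD_set2row (g : List (List Int)) (a i : Nat) (r : List Int) (ha : a < g.length) :
    (g.set a r).getD i [] = if i = a then r else g.getD i [] := by
  by_cases hia : a = i
  · subst hia; simp [List.getD, List.getElem?_set, ha]
  · simp [List.getD, List.getElem?_set, hia, Ne.symm hia]

lemma pvGet2_set2 (g : List (List Int)) (a b i j v : Int)
    (ha : 0 ≤ a) (hb : 0 ≤ b) (hi : 0 ≤ i) (hj : 0 ≤ j)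
    (halen : a.toNat < g.length) (hblen : b.toNat < (g.getD a.toNat []).length) :
    pvGet2 (pvSet2 g a b v) i j = if i = a ∧ j = b then v else pvGet2 g i j := by
  rw [pvSet2_nonneg _ _ _ _ ha hb, pvGet2_nonneg _ _ _ hi hj, pvGet2_nonneg _ _ _ hi hj,
    pvGetD_set2row _ _ _ _ halen]
  by_cases hia : i.toNat = a.toNat
  · have hia' : i = a := by omega
    rw [if_pos hia, pvGetD_set1 _ _ _ _ hblen]
    by_cases hjb : j.toNat = b.toNat
    · have hjb' : j = b := by omega
      simp [hia', hjb', hjb]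
    · have hjb' : ¬ j = b := by omega
      simp [hia', hjb', hjb]
  · have hia' : ¬ i = a := by omega
    simp [hia, hia']

-- ---- the finite set of filled cells, for the fuel bound ----

def pvFS (L : List (List Int)) (n m : Nat) : Finset (Int × Int) :=
  ((Finset.range n ×ˢ Finset.range m).image (fun p => ((p.1 : Int), (p.2 : Int)))).filter
    (fun c => pvGet2 L c.1 c.2 ≠ 0)

lemma pvMem_FS {L : List (List Int)} {n m : Nat} {c : Int × Int} :
    c ∈ pvFS L n m ↔ pvF L n m c := by
  simp only [pvFS, pvF, Finset.mem_filter, Finset.mem_image, Finset.mem_product]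
  constructor
  · rintro ⟨⟨⟨a, b⟩, hab, rfl⟩, hv⟩
    simp only [Finset.mem_product, Finset.mem_range] at hab
    have := hab.1; have := hab.2
    refine ⟨by positivity, by simp; omega, by positivity, by simp; omega, hv⟩
  · rintro ⟨h1, h2, h3, h4, h5⟩
    refine ⟨⟨⟨c.1.toNat, c.2.toNat⟩, ?_, ?_⟩, h5⟩
    · simp only [Finset.mem_product, Finset.mem_range]; omega
    · ext <;> simp <;> omega

lemma pvFS_card (L : List (List Int)) (n m : Nat) : (pvFS L n m).card ≤ n * m := by
  calc (pvFS L n m).card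
      ≤ ((Finset.range n ×ˢ Finset.range m).image
          (fun p : Nat × Nat => ((p.1 : Int), (p.2 : Int)))).card := Finset.card_filter_le _ _
    _ ≤ (Finset.range n ×ˢ Finset.range m).card := Finset.card_image_le
    _ = n * m := by simp

-- ---- invariant tying A's matrices to an abstract visited set V ----

def pvAInv (L : List (List Int)) (n m : Nat) (V : Finset (Int × Int))
    (nl vis : List (List Int)) : Prop :=
  nl.length = n ∧ vis.length = n ∧
  (∀ k : Nat, k < n → m ≤ (nl.getD k []).length) ∧
  (∀ k : Nat, k < n → m ≤ (vis.getD k []).length) ∧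
  (∀ c : Int × Int, 0 ≤ c.1 → c.1 < (n : Int) → 0 ≤ c.2 → c.2 < (m : Int) →
     pvGet2 nl c.1 c.2 = if c ∈ V then 0 else pvGet2 L c.1 c.2) ∧
  (∀ c : Int × Int, 0 ≤ c.1 → c.1 < (n : Int) → 0 ≤ c.2 → c.2 < (m : Int) →
     (pvGet2 vis c.1 c.2 ≠ 0 ↔ c ∈ V)) ∧
  (∀ c ∈ V, pvF L n m c)

lemma pvAInv_mark {L : List (List Int)} {n m : Nat} {V : Finset (Int × Int)}
    {nl vis : List (List Int)} (h : pvAInv L n m V nl vis) {c : Int × Int}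
    (hc : pvF L n m c) (hcV : c ∉ V) :
    pvAInv L n m (insert c V) (pvSet2 nl c.1 c.2 0) (pvSet2 vis c.1 c.2 1) := by
  obtain ⟨h1, h2, h3, h4, h5, h6, h7⟩ := h
  obtain ⟨hc1, hc2, hc3, hc4, hc5⟩ := hc
  have hlen1 : c.1.toNat < nl.length := by omega
  have hlen2 : c.1.toNat < vis.length := by omega
  have hrow1 : c.2.toNat < (nl.getD c.1.toNat []).length := by
    have := h3 c.1.toNat (by omega); omega
  have hrow2 : c.2.toNat < (vis.getD c.1.toNat []).length := by
    have := h4 c.1.toNat (by omega); omega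
  refine ⟨?_, ?_, ?_, ?_, ?_, ?_, ?_⟩
  · rw [pvLength_set2 _ _ _ _ hc1 hc3]; exact h1
  · rw [pvLength_set2 _ _ _ _ hc1 hc3]; exact h2
  · intro k hk; rw [pvRow_set2 _ _ _ _ hc1 hc3]; exact h3 k hk
  · intro k hk; rw [pvRow_set2 _ _ _ _ hc1 hc3]; exact h4 k hk
  · intro d hd1 hd2 hd3 hd4
    rw [pvGet2_set2 _ _ _ _ _ _ hc1 hc3 hd1 hd3 hlen1 hrow1]
    by_cases hdc : d.1 = c.1 ∧ d.2 = c.2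
    · have hdc' : d = c := Prod.ext hdc.1 hdc.2
      simp [hdc, hdc']
    · have hne : d ≠ c := fun h => hdc (by constructor <;> rw [h])
      rw [if_neg hdc, h5 d hd1 hd2 hd3 hd4]
      simp [Finset.mem_insert, hne]
  · intro d hd1 hd2 hd3 hd4
    rw [pvGet2_set2 _ _ _ _ _ _ hc1 hc3 hd1 hd3 hlen2 hrow2]
    by_cases hdc : d.1 = c.1 ∧ d.2 = c.2
    · have hdc' : d = c := Prod.ext hdc.1 hdc.2
      simp [hdc, hdc']
    · have hne : d ≠ c := fun h => hdc (by constructor <;> rw [h])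
      rw [if_neg hdc]
      rw [h6 d hd1 hd2 hd3 hd4]
      simp [Finset.mem_insert, hne]
  · intro d hd
    rcases Finset.mem_insert.1 hd with rfl | hd
    · exact ⟨hc1, hc2, hc3, hc4, hc5⟩
    · exact h7 d hd

-- ---- one direction step of A's BFS ----

lemma pvStepA_spec (L : List (List Int)) (n m : Nat) (x y : Int) (d : Int × Int)
    (hd : d ∈ pvDirs) (V : Finset (Int × Int)) (nl vis : List (List Int)) (cnt : Int)
    (q : List (Int × Int)) (hInv : pvAInv L n m V nl vis) (hxy : (x, y) ∈ V) :
    ∃ V' nl' vis' ap,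
      pvStepA n m x y (nl, vis, cnt, q) d =
        (nl', vis', cnt + ((V'.card : Int) - (V.card : Int)), q ++ ap) ∧
      pvAInv L n m V' nl' vis' ∧ V ⊆ V' ∧
      (∀ v ∈ V', v ∈ V ∨ pvAdj L n m (x, y) v) ∧
      (∀ v ∈ V', v ∈ V ∨ v ∈ ap) ∧
      (∀ a ∈ ap, a ∈ V') ∧
      (ap.length + ((pvFS L n m) \ V').card = ((pvFS L n m) \ V).card) ∧
      (pvAdj L n m (x, y) (x + d.1, y + d.2) → (x + d.1, y + d.2) ∈ V') := by
  obtain ⟨h1, h2, h3, h4, h5, h6, h7⟩ := hInv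
  by_cases hbnd : 0 ≤ x + d.1 ∧ x + d.1 < (n : Int) ∧ 0 ≤ y + d.2 ∧ y + d.2 < (m : Int)
  · by_cases hvis : pvGet2 vis (x + d.1) (y + d.2) ≠ 0
    · -- already visited: neighbour is in V
      have hmem : (x + d.1, y + d.2) ∈ V :=
        (h6 (x + d.1, y + d.2) hbnd.1 hbnd.2.1 hbnd.2.2.1 hbnd.2.2.2).1 hvis
      refine ⟨V, nl, vis, [], ?_, ⟨h1, h2, h3, h4, h5, h6, h7⟩, Finset.Subset.refl _,
        fun v hv => Or.inl hv, fun v hv => Or.inl hv, by simp, by simp, fun _ => hmem⟩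
      simp [pvStepA, hbnd, hvis]
    · have hnmem : (x + d.1, y + d.2) ∉ V := fun h =>
        hvis ((h6 (x + d.1, y + d.2) hbnd.1 hbnd.2.1 hbnd.2.2.1 hbnd.2.2.2).2 h)
      by_cases hnl : pvGet2 nl (x + d.1) (y + d.2) ≠ 0
      · -- fresh filled neighbour: mark it
        have hval : pvGet2 L (x + d.1) (y + d.2) ≠ 0 := by
          have := h5 (x + d.1, y + d.2) hbnd.1 hbnd.2.1 hbnd.2.2.1 hbnd.2.2.2
          rw [if_neg hnmem] at this
          rwa [this] at hnl
        have hF : pvF L n m (x + d.1, y + d.2) :=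
          ⟨hbnd.1, hbnd.2.1, hbnd.2.2.1, hbnd.2.2.2, hval⟩
        have hadj : pvAdj L n m (x, y) (x + d.1, y + d.2) :=
          ⟨h7 _ hxy, hF, by simpa using hd⟩
        have hcard : (insert (x + d.1, y + d.2) V).card = V.card + 1 :=
          Finset.card_insert_of_notMem hnmem
        have hFSmem : (x + d.1, y + d.2) ∈ pvFS L n m \ V := by
          rw [Finset.mem_sdiff]; exact ⟨pvMem_FS.2 hF, hnmem⟩
        refine ⟨insert (x + d.1, y + d.2) V, pvSet2 nl (x + d.1) (y + d.2) 0,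
          pvSet2 vis (x + d.1) (y + d.2) 1, [(x + d.1, y + d.2)], ?_,
          pvAInv_mark ⟨h1, h2, h3, h4, h5, h6, h7⟩ hF hnmem, Finset.subset_insert _ _,
          ?_, ?_, ?_, ?_, fun _ => Finset.mem_insert_self _ _⟩
        · simp only [pvStepA, hbnd, hvis, hnl, if_true, if_pos, if_neg, not_false_iff]
          simp [hcard]
          ring_nf
          simp [pvStepA, hbnd, hvis, hnl]
        · intro v hv
          rcases Finset.mem_insert.1 hv with rfl | hv
          · exact Or.inr hadj
          · exact Or.inl hv
        · intro v hv
          rcases Finset.mem_insert.1 hv with rfl | hv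
          · exact Or.inr (by simp)
          · exact Or.inl hv
        · intro a ha
          rcases List.mem_singleton.1 ha with rfl
          exact Finset.mem_insert_self _ _
        · rw [Finset.sdiff_insert, Finset.card_erase_of_mem hFSmem]
          have : 0 < (pvFS L n m \ V).card := Finset.card_pos.2 ⟨_, hFSmem⟩
          simp; omega
      · -- empty neighbour: nothing happens; an adjacent cell cannot be empty
        refine ⟨V, nl, vis, [], ?_, ⟨h1, h2, h3, h4, h5, h6, h7⟩, Finset.Subset.refl _,
          fun v hv => Or.inl hv, fun v hv => Or.inl hv, by simp, by simp, ?_⟩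
        · simp [pvStepA, hbnd, hvis, hnl]
        · intro hadj
          exfalso
          apply hnl
          have := h5 (x + d.1, y + d.2) hbnd.1 hbnd.2.1 hbnd.2.2.1 hbnd.2.2.2
          rw [if_neg hnmem] at this
          rw [this]
          exact hadj.2.1.2.2.2.2
  · refine ⟨V, nl, vis, [], ?_, ⟨h1, h2, h3, h4, h5, h6, h7⟩, Finset.Subset.refl _,
      fun v hv => Or.inl hv, fun v hv => Or.inl hv, by simp, by simp, ?_⟩
    · simp [pvStepA, hbnd]
    · intro hadj
      exact absurd ⟨hadj.2.1.1, hadj.2.1.2.1, hadj.2.1.2.2.1, hadj.2.1.2.2.2.1⟩ hbnd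

-- ---- A's inner 'for d in range(4)' as a whole ----

lemma pvFoldA_spec (L : List (List Int)) (n m : Nat) (x y : Int) :
    ∀ (ds : List (Int × Int)), (∀ d ∈ ds, d ∈ pvDirs) →
    ∀ (V : Finset (Int × Int)) (nl vis : List (List Int)) (cnt : Int) (q : List (Int × Int)),
      pvAInv L n m V nl vis → (x, y) ∈ V →
      ∃ V' nl' vis' ap,
        ds.foldl (pvStepA n m x y) (nl, vis, cnt, q) =
          (nl', vis', cnt + ((V'.card : Int) - (V.card : Int)), q ++ ap) ∧
        pvAInv L n m V' nl' vis' ∧ V ⊆ V' ∧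
        (∀ v ∈ V', v ∈ V ∨ pvAdj L n m (x, y) v) ∧
        (∀ v ∈ V', v ∈ V ∨ v ∈ ap) ∧
        (∀ a ∈ ap, a ∈ V') ∧
        (ap.length + ((pvFS L n m) \ V').card = ((pvFS L n m) \ V).card) ∧
        (∀ d ∈ ds, pvAdj L n m (x, y) (x + d.1, y + d.2) → (x + d.1, y + d.2) ∈ V') := by
  intro ds
  induction ds with
  | nil =>
    intro _ V nl vis cnt q hInv hxy
    refine ⟨V, nl, vis, [], ?_, hInv, Finset.Subset.refl _, fun v hv => Or.inl hv,
      fun v hv => Or.inl hv, by simp, by simp, by simp⟩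
    simp
  | cons d ds ih =>
    intro hds V nl vis cnt q hInv hxy
    obtain ⟨V1, nl1, vis1, ap1, heq1, hInv1, hsub1, hadj1, hap1', hap1, hms1, hcov1⟩ :=
      pvStepA_spec L n m x y d (hds d (by simp)) V nl vis cnt q hInv hxy
    obtain ⟨V2, nl2, vis2, ap2, heq2, hInv2, hsub2, hadj2, hap2', hap2, hms2, hcov2⟩ :=
      ih (fun e he => hds e (by simp [he])) V1 nl1 vis1
        (cnt + ((V1.card : Int) - (V.card : Int))) (q ++ ap1) hInv1 (hsub1 hxy)
    refine ⟨V2, nl2, vis2, ap1 ++ ap2, ?_, hInv2, hsub1.trans hsub2, ?_, ?_, ?_, ?_, ?_⟩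
    · rw [List.foldl_cons, heq1, heq2]
      have harith : cnt + ((V1.card : Int) - (V.card : Int)) + ((V2.card : Int) - (V1.card : Int)) =
          cnt + ((V2.card : Int) - (V.card : Int)) := by ring
      rw [harith, List.append_assoc]
    · intro v hv
      rcases hadj2 v hv with hv1 | ha
      · exact hadj1 v hv1
      · exact Or.inr ha
    · intro v hv
      rcases hap2' v hv with hv1 | ha
      · rcases hap1' v hv1 with h | h
        · exact Or.inl h
        · exact Or.inr (List.mem_append.2 (Or.inl h))
      · exact Or.inr (List.mem_append.2 (Or.inr ha))
    · intro a ha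
      rcases List.mem_append.1 ha with h | h
      · exact hsub2 (hap1 a h)
      · exact hap2 a h
    · rw [List.length_append]; omega
    · intro e he hadj
      rcases List.mem_cons.1 he with rfl | he
      · exact hsub2 (hcov1 hadj)
      · exact hcov2 e he hadj

-- ---- A's 'while q:' loop ----

lemma pvBFS_spec (L : List (List Int)) (n m : Nat) (j : Int) :
    ∀ (fuel : Nat) (V : Finset (Int × Int)) (nl vis : List (List Int)) (q : List (Int × Int)),
      pvAInv L n m V nl vis →
      (∀ a ∈ q, a ∈ V) →
      (∀ v ∈ V, pvReach L n m j v) →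
      (∀ v ∈ V, v ∈ q ∨ ∀ e, pvAdj L n m v e → e ∈ V) →
      q.length + ((pvFS L n m) \ V).card ≤ fuel →
      ∃ V' nl' vis',
        pvBFS n m fuel (nl, vis, (V.card : Int), q) = (nl', vis', (V'.card : Int), []) ∧
        pvAInv L n m V' nl' vis' ∧ V ⊆ V' ∧
        (∀ v ∈ V', pvReach L n m j v) ∧
        (∀ v ∈ V', ∀ e, pvAdj L n m v e → e ∈ V') := by
  intro fuel
  induction fuel with
  | zero =>
    intro V nl vis q hInv hq hreach hcl hfuel
    have hq0 : q = [] := by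
      cases q with
      | nil => rfl
      | cons a q' => simp at hfuel
    subst hq0
    exact ⟨V, nl, vis, rfl, hInv, Finset.Subset.refl _, hreach,
      fun v hv e hadj => (hcl v hv).resolve_left (by simp) e hadj⟩
  | succ fuel ih =>
    intro V nl vis q hInv hq hreach hcl hfuel
    cases q with
    | nil =>
      exact ⟨V, nl, vis, by simp [pvBFS], hInv, Finset.Subset.refl _, hreach,
        fun v hv e hadj => (hcl v hv).resolve_left (by simp) e hadj⟩
    | cons hd q' =>
      obtain ⟨x, y⟩ := hd
      have hxy : (x, y) ∈ V := hq _ (by simp)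
      obtain ⟨V1, nl1, vis1, ap, heq1, hInv1, hsub1, hadj1, hap1', hap1, hms1, hcov1⟩ :=
        pvFoldA_spec L n m x y pvDirs (fun d hd => hd) V nl vis (V.card : Int) q' hInv hxy
      have hcnt : (V.card : Int) + ((V1.card : Int) - (V.card : Int)) = (V1.card : Int) := by
        ring
      obtain ⟨V2, nl2, vis2, heq2, hInv2, hsub2, hreach2, hcl2⟩ :=
        ih V1 nl1 vis1 (q' ++ ap) hInv1
          (fun a ha => by
            rcases List.mem_append.1 ha with h | h
            · exact hsub1 (hq a (by simp [h]))
            · exact hap1 a h)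
          (fun v hv => by
            rcases hadj1 v hv with h | h
            · exact hreach v h
            · obtain ⟨c, hc, hr⟩ := hreach _ hxy
              exact ⟨c, hc, hr.tail h⟩)
          (fun v hv => by
            by_cases hvV : v ∈ V
            · rcases hcl v hvV with hmem | hclv
              · rcases List.mem_cons.1 hmem with heq | hmem'
                · right
                  intro e hadj
                  obtain ⟨d, hd, hde⟩ : ∃ d ∈ pvDirs, e = (x + d.1, y + d.2) := by
                    refine ⟨(e.1 - x, e.2 - y), ?_, ?_⟩
                    · have := hadj.2.2
                      rw [heq] at this
                      simpa using this
                    · simp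
                  subst hde
                  apply hcov1 d hd
                  rw [← heq]
                  exact hadj
                · exact Or.inl (List.mem_append.2 (Or.inl hmem'))
              · exact Or.inr fun e hadj => hsub1 (hclv e hadj)
            · rcases hap1' v hv with h | h
              · exact absurd h hvV
              · exact Or.inl (List.mem_append.2 (Or.inr h)))
          (by
            rw [List.length_append]
            simp only [List.length_cons] at hfuel
            omega)
      refine ⟨V2, nl2, vis2, ?_, hInv2, hsub1.trans hsub2, hreach2, hcl2⟩
      rw [show pvBFS n m (fuel + 1) (nl, vis, (V.card : Int), (x, y) :: q') =
          pvBFS n m fuel (pvDirs.foldl (pvStepA n m x y) (nl, vis, (V.card : Int), q'))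
        from rfl, heq1, hcnt, heq2]

-- ---- A's 'for i in range(n)' loop ----

lemma pvRows_spec (L : List (List Int)) (n m : Nat) (j : Int) (hj0 : 0 ≤ j)
    (hjm : j < (m : Int)) :
    ∀ (is : List Nat), (∀ i ∈ is, i < n) →
    ∀ (V : Finset (Int × Int)) (nl vis : List (List Int)),
      pvAInv L n m V nl vis →
      (∀ v ∈ V, pvReach L n m j v) →
      (∀ v ∈ V, ∀ e, pvAdj L n m v e → e ∈ V) →
      ∃ V' nl' vis',
        is.foldl (fun (st : List (List Int) × List (List Int) × Int) (i : Nat) =>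
            pvRowA n m j st (i : Int)) (nl, vis, (V.card : Int)) =
          (nl', vis', (V'.card : Int)) ∧
        pvAInv L n m V' nl' vis' ∧ V ⊆ V' ∧
        (∀ v ∈ V', pvReach L n m j v) ∧
        (∀ v ∈ V', ∀ e, pvAdj L n m v e → e ∈ V') ∧
        (∀ i ∈ is, pvF L n m ((i : Int), j) → ((i : Int), j) ∈ V') := by
  intro is
  induction is with
  | nil =>
    intro _ V nl vis hInv hreach hcl
    exact ⟨V, nl, vis, rfl, hInv, Finset.Subset.refl _, hreach, hcl, by simp⟩
  | cons i is ih =>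
    intro hbnd V nl vis hInv hreach hcl
    have hin : i < n := hbnd i (by simp)
    have h5 := hInv.2.2.2.2.1
    have h6 := hInv.2.2.2.2.2.1
    by_cases hg : pvGet2 nl (i : Int) j ≠ 0 ∧ ¬ pvGet2 vis (i : Int) j ≠ 0
    · -- unvisited filled seed: start a BFS
      have hi0 : (0 : Int) ≤ (i : Int) := by positivity
      have hiN : ((i : Int)) < (n : Int) := by exact_mod_cast hin
      have hnmem : ((i : Int), j) ∉ V := fun h => hg.2 ((h6 _ hi0 hiN hj0 hjm).2 h)
      have hval : pvGet2 L (i : Int) j ≠ 0 := by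
        have := h5 ((i : Int), j) hi0 hiN hj0 hjm
        rw [if_neg hnmem] at this
        rw [← this]
        exact hg.1
      have hF : pvF L n m ((i : Int), j) := ⟨hi0, hiN, hj0, hjm, hval⟩
      have hmark := pvAInv_mark hInv hF hnmem
      have hcard : (insert ((i : Int), j) V).card = V.card + 1 :=
        Finset.card_insert_of_notMem hnmem
      obtain ⟨V2, nl2, vis2, heq2, hInv2, hsub2, hreach2, hcl2⟩ :=
        pvBFS_spec L n m j (n * m + 1) (insert ((i : Int), j) V)
          (pvSet2 nl (i : Int) j 0) (pvSet2 vis (i : Int) j 1) [((i : Int), j)] hmark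
          (by simp)
          (fun v hv => by
            rcases Finset.mem_insert.1 hv with rfl | hv
            · exact ⟨_, ⟨hF, rfl⟩, Relation.ReflTransGen.refl⟩
            · exact hreach v hv)
          (fun v hv => by
            rcases Finset.mem_insert.1 hv with rfl | hv
            · exact Or.inl (by simp)
            · exact Or.inr fun e hadj => Finset.mem_insert_of_mem (hcl v hv e hadj))
          (by
            have h1 : ((pvFS L n m) \ insert ((i : Int), j) V).card ≤ (pvFS L n m).card :=
              Finset.card_le_card (Finset.sdiff_subset)
            have h2 := pvFS_card L n m
            simp only [List.length_cons, List.length_nil]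
            omega)
      obtain ⟨V3, nl3, vis3, heq3, hInv3, hsub3, hreach3, hcl3, hseeds3⟩ :=
        ih (fun a ha => hbnd a (by simp [ha])) V2 nl2 vis2 hInv2 hreach2 hcl2
      refine ⟨V3, nl3, vis3, ?_, hInv3, ?_, hreach3, hcl3, ?_⟩
      · rw [List.foldl_cons]
        have hrow : pvRowA n m j (nl, vis, (V.card : Int)) (i : Int) = (nl2, vis2, (V2.card : Int)) := by
          rw [pvRowA, if_pos hg]
          have : (V.card : Int) + 1 = ((insert ((i : Int), j) V).card : Int) := by
            rw [hcard]; push_cast; ring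
          rw [this, heq2]
        rw [hrow, heq3]
      · exact (Finset.subset_insert _ _).trans (hsub2.trans hsub3)
      · intro a ha hFa
        rcases List.mem_cons.1 ha with rfl | ha
        · exact hsub3 (hsub2 (Finset.mem_insert_self _ _))
        · exact hseeds3 a ha hFa
    · -- skipped: the cell is empty or already visited
      obtain ⟨V3, nl3, vis3, heq3, hInv3, hsub3, hreach3, hcl3, hseeds3⟩ :=
        ih (fun a ha => hbnd a (by simp [ha])) V nl vis hInv hreach hcl
      refine ⟨V3, nl3, vis3, ?_, hInv3, hsub3, hreach3, hcl3, ?_⟩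
      · rw [List.foldl_cons, pvRowA, if_neg hg]
        exact heq3
      · intro a ha hFa
        rcases List.mem_cons.1 ha with rfl | ha
        · -- guard failed but the cell is filled ⇒ it was already visited
          have hi0 : (0 : Int) ≤ (a : Int) := by positivity
          have hiN : ((a : Int)) < (n : Int) := by exact_mod_cast hbnd a (by simp)
          by_cases hmem : ((a : Int), j) ∈ V
          · exact hsub3 hmem
          · exfalso
            apply hg
            constructor
            · have := h5 ((a : Int), j) hi0 hiN hj0 hjm
              rw [if_neg hmem] at this
              rw [this]
              exact hFa.2.2.2.2
            · intro hvis
              exact hmem ((h6 ((a : Int), j) hi0 hiN hj0 hjm).1 hvis)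
        · exact hseeds3 a ha hFa

-- ---- the initial state of one column of A ----

lemma pvAInv_init (L : List (List Int)) (m : Nat) (hPre : Pre_solution L)
    (hm : m = (L.headD []).length) :
    pvAInv L L.length m ∅ L (List.replicate L.length (List.replicate m (0 : Int))) := by
  refine ⟨rfl, by simp, ?_, ?_, ?_, ?_, by simp⟩
  · intro k hk
    have hrow : L.getD k [] ∈ L := by
      have : L.getD k [] = L[k] := by simp [List.getD, List.getElem?_eq_getElem hk]
      rw [this]; exact List.getElem_mem hk
    rw [hm]
    exact hPre.2 _ hrow
  · intro k hk
    simp [List.getD, List.getElem?_replicate, hk]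
  · intro c _ _ _ _
    simp
  · intro c hc1 hc2 hc3 hc4
    rw [pvGet2_nonneg _ _ _ hc1 hc3]
    have hk : c.1.toNat < L.length := by omega
    have hk2 : c.2.toNat < m := by omega
    simp [List.getD, List.getElem?_replicate, hk, hk2]

-- ---- generic lemmas about 'conditionally add' folds over PySem.Set ----

lemma pvMemFoldIf {β : Type} (g : β → Int × Int) (P : β → Prop) [DecidablePred P] :
    ∀ (l : List β) (s : PySem.Set (Int × Int)) (x : Int × Int),
      (x ∈ l.foldl (fun s b => if P b then PySem.Set.add s (g b) else s) s ↔
        x ∈ s ∨ ∃ b ∈ l, P b ∧ x = g b) := by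
  intro l
  induction l with
  | nil => intro s x; simp
  | cons b l ih =>
    intro s x
    rw [List.foldl_cons]
    by_cases hb : P b
    · rw [if_pos hb, ih]
      simp [PySem.Set.mem_add, hb]
      rw [or_assoc]
    · rw [if_neg hb, ih]
      simp [hb]

lemma pvNodupFoldIf {β : Type} (g : β → Int × Int) (P : β → Prop) [DecidablePred P] :
    ∀ (l : List β) (s : PySem.Set (Int × Int)), s.Nodup →
      (l.foldl (fun s b => if P b then PySem.Set.add s (g b) else s) s).Nodup := by
  intro l
  induction l with
  | nil => intro s hs; exact hs
  | cons b l ih =>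
    intro s hs
    rw [List.foldl_cons]
    by_cases hb : P b
    · rw [if_pos hb]; exact ih _ (PySem.Set.nodup_add _ _ hs)
    · rw [if_neg hb]; exact ih _ hs

-- ---- the filled-cells set of B ----

lemma pvFilled_mem (L : List (List Int)) (n m : Nat) (x : Int × Int) :
    x ∈ pvFilled L n m ↔ pvF L n m x := by
  have haux : ∀ (is : List Nat) (s : PySem.Set (Int × Int)),
      (x ∈ is.foldl (fun s i => (List.range m).foldl
          (fun s j => if (L.getD i []).getD j 0 ≠ 0 then PySem.Set.add s ((i : Int), (j : Int))
            else s) s) s ↔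
        x ∈ s ∨ ∃ i ∈ is, ∃ jj ∈ List.range m, (L.getD i []).getD jj 0 ≠ 0 ∧
          x = ((i : Int), (jj : Int))) := by
    intro is
    induction is with
    | nil => intro s; simp
    | cons i is ih =>
      intro s
      rw [List.foldl_cons, ih,
        pvMemFoldIf (fun jj : Nat => ((i : Int), (jj : Int)))
          (fun jj : Nat => (L.getD i []).getD jj 0 ≠ 0)]
      simp
      rw [or_assoc]
  unfold pvFilled
  rw [haux]
  constructor
  · rintro (h | ⟨i, hi, jj, hjj, hv, rfl⟩)
    · simp [PySem.Set.empty] at h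
    · rw [List.mem_range] at hi hjj
      refine ⟨by positivity, by simp; omega, by positivity, by simp; omega, ?_⟩
      rw [pvGet2_nonneg _ _ _ (by positivity) (by positivity)]
      simpa using hv
  · rintro ⟨h1, h2, h3, h4, h5⟩
    right
    refine ⟨x.1.toNat, by rw [List.mem_range]; omega, x.2.toNat, by rw [List.mem_range]; omega, ?_, ?_⟩
    · rw [pvGet2_nonneg _ _ _ h1 h3] at h5
      exact h5
    · ext <;> simp <;> omega

lemma pvFilled_nodup (L : List (List Int)) (n m : Nat) : (pvFilled L n m).Nodup := by
  have haux : ∀ (is : List Nat) (s : PySem.Set (Int × Int)), s.Nodup →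
      (is.foldl (fun s i => (List.range m).foldl
          (fun s j => if (L.getD i []).getD j 0 ≠ 0 then PySem.Set.add s ((i : Int), (j : Int))
            else s) s) s).Nodup := by
    intro is
    induction is with
    | nil => intro s hs; exact hs
    | cons i is ih =>
      intro s hs
      rw [List.foldl_cons]
      exact ih _ (pvNodupFoldIf (fun jj : Nat => ((i : Int), (jj : Int)))
        (fun jj : Nat => (L.getD i []).getD jj 0 ≠ 0) _ _ hs)
  exact haux _ _ (by simp [PySem.Set.empty])

-- ---- B's one dilation step ----

lemma pvGrow_mem (filled : List (Int × Int)) (comp : PySem.Set (Int × Int)) (x : Int × Int) :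
    x ∈ pvGrow filled comp ↔
      x ∈ comp ∨ ∃ c ∈ comp, ∃ d ∈ pvDirsB,
        (c.1 + d.1, c.2 + d.2) ∈ filled ∧ x = (c.1 + d.1, c.2 + d.2) := by
  have haux : ∀ (cs : List (Int × Int)) (acc : PySem.Set (Int × Int)),
      (x ∈ cs.foldl (fun acc c => pvDirsB.foldl
          (fun acc d => if (c.1 + d.1, c.2 + d.2) ∈ filled then
            PySem.Set.add acc (c.1 + d.1, c.2 + d.2) else acc) acc) acc ↔
        x ∈ acc ∨ ∃ c ∈ cs, ∃ d ∈ pvDirsB,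
          (c.1 + d.1, c.2 + d.2) ∈ filled ∧ x = (c.1 + d.1, c.2 + d.2)) := by
    intro cs
    induction cs with
    | nil => intro acc; simp
    | cons c cs ih =>
      intro acc
      rw [List.foldl_cons, ih,
        pvMemFoldIf (fun d : Int × Int => (c.1 + d.1, c.2 + d.2))
          (fun d : Int × Int => (c.1 + d.1, c.2 + d.2) ∈ filled)]
      simp only [List.mem_cons]
      constructor
      · rintro (((h | ⟨d, hd, hv, rfl⟩) ) | ⟨c', hc', d, hd, hv, rfl⟩)
        · exact Or.inl h
        · exact Or.inr ⟨c, Or.inl rfl, d, hd, hv, rfl⟩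
        · exact Or.inr ⟨c', Or.inr hc', d, hd, hv, rfl⟩
      · rintro (h | ⟨c', (rfl | hc'), d, hd, hv, rfl⟩)
        · exact Or.inl (Or.inl h)
        · exact Or.inl (Or.inr ⟨d, hd, hv, rfl⟩)
        · exact Or.inr ⟨c', hc', d, hd, hv, rfl⟩
  exact haux comp comp

lemma pvGrow_nodup (filled : List (Int × Int)) (comp : PySem.Set (Int × Int))
    (h : comp.Nodup) : (pvGrow filled comp).Nodup := by
  have haux : ∀ (cs : List (Int × Int)) (acc : PySem.Set (Int × Int)), acc.Nodup →
      (cs.foldl (fun acc c => pvDirsB.foldl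
          (fun acc d => if (c.1 + d.1, c.2 + d.2) ∈ filled then
            PySem.Set.add acc (c.1 + d.1, c.2 + d.2) else acc) acc) acc).Nodup := by
    intro cs
    induction cs with
    | nil => intro acc h; exact h
    | cons c cs ih =>
      intro acc hacc
      rw [List.foldl_cons]
      exact ih _ (pvNodupFoldIf (fun d : Int × Int => (c.1 + d.1, c.2 + d.2))
        (fun d : Int × Int => (c.1 + d.1, c.2 + d.2) ∈ filled) _ _ hacc)
  exact haux comp comp h

lemma pvLen_lt (a b : List (Int × Int)) (ha : a.Nodup) (hb : b.Nodup)
    (hsub : ∀ x ∈ a, x ∈ b) (x : Int × Int) (hxb : x ∈ b) (hxa : x ∉ a) :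
    a.length < b.length := by
  have h1 : a.toFinset ⊂ b.toFinset := by
    constructor
    · intro y hy; rw [List.mem_toFinset] at *; exact hsub y hy
    · intro hc
      exact hxa (List.mem_toFinset.1 (hc (List.mem_toFinset.2 hxb)))
  have := Finset.card_lt_card h1
  rwa [List.toFinset_card_of_nodup ha, List.toFinset_card_of_nodup hb] at this

lemma pvLen_le (a b : List (Int × Int)) (ha : a.Nodup) (hb : b.Nodup)
    (hsub : ∀ x ∈ a, x ∈ b) : a.length ≤ b.length := by
  have h1 : a.toFinset ⊆ b.toFinset := by
    intro y hy; rw [List.mem_toFinset] at *; exact hsub y hy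
  have := Finset.card_le_card h1
  rwa [List.toFinset_card_of_nodup ha, List.toFinset_card_of_nodup hb] at this

lemma pvDirs_iffB (p : Int × Int) : p ∈ pvDirs ↔ p ∈ pvDirsB := by
  simp [pvDirs, pvDirsB]
  tauto

-- ---- B's grow-to-fixpoint loop ----

lemma pvSaturate_spec (L : List (List Int)) (n m : Nat) (j : Int) :
    ∀ (fuel : Nat) (comp : PySem.Set (Int × Int)), comp.Nodup →
      (∀ c, pvSeed L n m j c → c ∈ comp) →
      (∀ c ∈ comp, pvReach L n m j c) →
      (pvFilled L n m).length + 1 ≤ fuel + comp.length →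
      (pvSaturate (pvFilled L n m) fuel comp).Nodup ∧
      (∀ x, x ∈ pvSaturate (pvFilled L n m) fuel comp ↔ pvReach L n m j x) := by
  intro fuel
  induction fuel with
  | zero =>
    intro comp hnd hseed hreach hfuel
    exfalso
    have hsub : ∀ x ∈ comp, x ∈ pvFilled L n m := fun x hx =>
      (pvFilled_mem L n m x).2 (pvReach_F (hreach x hx))
    have := pvLen_le comp (pvFilled L n m) hnd (pvFilled_nodup L n m) hsub
    omega
  | succ fuel ih =>
    intro comp hnd hseed hreach hfuel
    have hgsub : ∀ x ∈ comp, x ∈ pvGrow (pvFilled L n m) comp :=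
      fun x hx => (pvGrow_mem _ _ x).2 (Or.inl hx)
    by_cases heq : PySem.Set.equal (pvGrow (pvFilled L n m) comp) comp = true
    · have hiff := (PySem.Set.equal_iff _ _).1 heq
      have hcl : ∀ c ∈ comp, ∀ e, pvAdj L n m c e → e ∈ comp := by
        intro c hc e hadj
        have hdelta : (e.1 - c.1, e.2 - c.2) ∈ pvDirsB := (pvDirs_iffB _).1 hadj.2.2
        have hef : e ∈ pvFilled L n m := (pvFilled_mem L n m e).2 hadj.2.1
        have he : e = (c.1 + (e.1 - c.1), c.2 + (e.2 - c.2)) := by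
          have h1 : e.1 = c.1 + (e.1 - c.1) := by ring
          have h2 : e.2 = c.2 + (e.2 - c.2) := by ring
          exact Prod.ext h1 h2
        apply hiff _ |>.1
        rw [pvGrow_mem]
        right
        exact ⟨c, hc, (e.1 - c.1, e.2 - c.2), hdelta, by rw [← he]; exact hef, he⟩
      have hmem := pvMem_iff_reach (fun x => x ∈ comp) hseed hreach hcl
      have : pvSaturate (pvFilled L n m) (fuel + 1) comp = comp := by
        rw [pvSaturate]
        simp [heq]
      rw [this]
      exact ⟨hnd, hmem⟩
    · have hgnd := pvGrow_nodup (pvFilled L n m) comp hnd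
      have hgrow_reach : ∀ c ∈ pvGrow (pvFilled L n m) comp, pvReach L n m j c := by
        intro c hc
        rcases (pvGrow_mem _ _ c).1 hc with h | ⟨c', hc', d, hd, hv, rfl⟩
        · exact hreach c h
        · obtain ⟨s, hs, hr⟩ := hreach c' hc'
          refine ⟨s, hs, hr.tail ?_⟩
          refine ⟨pvReach_F (hreach c' hc'), (pvFilled_mem L n m _).1 hv, ?_⟩
          rw [pvDirs_iffB]
          simpa using hd
      have hlt : comp.length < (pvGrow (pvFilled L n m) comp).length := by
        have hx : ∃ x, x ∈ pvGrow (pvFilled L n m) comp ∧ x ∉ comp := by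
          by_contra hno
          push_neg at hno
          exact heq ((PySem.Set.equal_iff _ _).2 fun x => ⟨fun h => by_contra fun hc => hc (hno x h) |>.elim, fun h => hgsub x h⟩)
        obtain ⟨x, hx1, hx2⟩ := hx
        exact pvLen_lt comp _ hnd hgnd hgsub x hx1 hx2
      have hstep : pvSaturate (pvFilled L n m) (fuel + 1) comp =
          pvSaturate (pvFilled L n m) fuel (pvGrow (pvFilled L n m) comp) := by
        rw [pvSaturate]
        simp [heq]
      rw [hstep]
      exact ih (pvGrow (pvFilled L n m) comp) hgnd
        (fun c hc => hgsub c (hseed c hc)) hgrow_reach (by omega)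

-- ---- putting one column together ----

lemma pvHeadD_getD (L : List (List Int)) : PySem.List.pyGetD L 0 [] = L.headD [] := by
  cases L with
  | nil => simp [PySem.List.pyGetD_zero]
  | cons a l => simp [PySem.List.pyGetD_zero, List.getD]

lemma pvColumn_eq (L : List (List Int)) (hPre : Pre_solution L) (m : Nat)
    (hm : m = (L.headD []).length) (j : Nat) (hj : j < m) :
    ∃ (cA : Int) (nl' vis' : List (List Int)),
      (List.range L.length).foldl
        (fun (st : List (List Int) × List (List Int) × Int) (i : Nat) =>
          pvRowA L.length m (j : Int) st (i : Int))
        (L, List.replicate L.length (List.replicate m (0 : Int)), (0 : Int)) =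
        (nl', vis', cA) ∧
      cA = ((pvSaturate (pvFilled L L.length m) ((pvFilled L L.length m).length + 1)
        ((List.range L.length).foldl
          (fun (s : PySem.Set (Int × Int)) (i : Nat) =>
            if ((i : Int), (j : Int)) ∈ pvFilled L L.length m then
              PySem.Set.add s ((i : Int), (j : Int)) else s)
          PySem.Set.empty)).length : Int) := by
  have hj0 : (0 : Int) ≤ (j : Int) := by positivity
  have hjm : ((j : Int)) < (m : Int) := by exact_mod_cast hj
  -- A's side: run the row loop
  obtain ⟨V', nl', vis', heqA, hInvA, _, hreachA, hclA, hseedsA⟩ :=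
    pvRows_spec L L.length m (j : Int) hj0 hjm (List.range L.length)
      (fun i hi => List.mem_range.1 hi) ∅ L
      (List.replicate L.length (List.replicate m (0 : Int)))
      (pvAInv_init L m hPre hm) (by simp) (by simp)
  simp only [Finset.card_empty, Nat.cast_zero] at heqA
  have hseedV : ∀ c, pvSeed L L.length m (j : Int) c → c ∈ V' := by
    rintro c ⟨hF, hcj⟩
    have h1 : c = ((c.1.toNat : Int), (j : Int)) := by
      have h0 := hF.1
      exact Prod.ext (by simp; omega) hcj
    rw [h1]
    apply hseedsA c.1.toNat
    · rw [List.mem_range]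
      have h0 := hF.1
      have h2 := hF.2.1
      omega
    · rw [← h1]; exact hF
  have hVmem : ∀ x, x ∈ V' ↔ pvReach L L.length m (j : Int) x :=
    pvMem_iff_reach (fun x => x ∈ V') hseedV hreachA hclA
  -- B's side: the seed set
  have hcomp0mem : ∀ x, x ∈ (List.range L.length).foldl
      (fun (s : PySem.Set (Int × Int)) (i : Nat) =>
        if ((i : Int), (j : Int)) ∈ pvFilled L L.length m then
          PySem.Set.add s ((i : Int), (j : Int)) else s)
      PySem.Set.empty ↔ pvSeed L L.length m (j : Int) x := by
    intro x
    rw [pvMemFoldIf (fun i : Nat => ((i : Int), (j : Int)))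
      (fun i : Nat => ((i : Int), (j : Int)) ∈ pvFilled L L.length m)]
    simp only [PySem.Set.empty, List.not_mem_nil, false_or, List.mem_range]
    constructor
    · rintro ⟨i, hi, hmem, rfl⟩
      exact ⟨(pvFilled_mem _ _ _ _).1 hmem, rfl⟩
    · rintro ⟨hF, hcj⟩
      have h1 : x = ((x.1.toNat : Int), (j : Int)) :=
        Prod.ext (by have h0 := hF.1; simp; omega) hcj
      refine ⟨x.1.toNat, by have h0 := hF.1; have h2 := hF.2.1; omega, ?_, h1⟩
      rw [pvFilled_mem, ← h1]
      exact hF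
  have hcomp0nd : ((List.range L.length).foldl
      (fun (s : PySem.Set (Int × Int)) (i : Nat) =>
        if ((i : Int), (j : Int)) ∈ pvFilled L L.length m then
          PySem.Set.add s ((i : Int), (j : Int)) else s)
      PySem.Set.empty).Nodup :=
    pvNodupFoldIf (fun i : Nat => ((i : Int), (j : Int)))
      (fun i : Nat => ((i : Int), (j : Int)) ∈ pvFilled L L.length m) _ _ (by simp [PySem.Set.empty])
  obtain ⟨hndB, hmemB⟩ :=
    pvSaturate_spec L L.length m (j : Int) ((pvFilled L L.length m).length + 1) _
      hcomp0nd (fun c hc => (hcomp0mem c).2 hc)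
      (fun c hc => ⟨c, (hcomp0mem c).1 hc, Relation.ReflTransGen.refl⟩)
      (by omega)
  -- the two sets are equal, hence the two counts
  refine ⟨(V'.card : Int), nl', vis', heqA, ?_⟩
  have hsets : V' = (pvSaturate (pvFilled L L.length m)
      ((pvFilled L L.length m).length + 1)
      ((List.range L.length).foldl
        (fun (s : PySem.Set (Int × Int)) (i : Nat) =>
          if ((i : Int), (j : Int)) ∈ pvFilled L L.length m then
            PySem.Set.add s ((i : Int), (j : Int)) else s)
        PySem.Set.empty)).toFinset := by
    apply Finset.ext
    intro x
    rw [List.mem_toFinset, hVmem, hmemB]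
  rw [hsets, List.toFinset_card_of_nodup hndB]


-- ===== VERDICT (by name: the statement is the Claim_ definition above) =====
theorem solution_spec : Claim_equal_solution := by
  intro land _hDom hPre
  unfold Spec_solution solution solution_alt
  rw [pvHeadD_getD]
  apply List.foldl_ext
  intro acc j hj
  obtain ⟨cA, nl', vis', heqA, hcnt⟩ :=
    pvColumn_eq land hPre (land.headD []).length rfl j (List.mem_range.1 hj)
  dsimp only
  rw [heqA]
  dsimp only
  rw [hcnt]
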